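-- pv_equiv track=rewrite | github.com/srinath-sankaragallu/series_of_numbers_himilton_cycle | sum_of_pair_square_numbers.py | get_pairs_of_sum
-- ===== SOURCE A (Python) =====
-- def get_pairs_of_sum(num,n):
--     res = []
--     res1 = []
--     for i in range(1,(num//2)+1):
--         ln = num - i
--         if ln > n:
--             continue
--         rn = i
--         if ln > rn :
--             res.append((ln,rn))
--             res1.extend((ln,rn))
--     return (res , res1 )
-- ===== SOURCE B (Python) =====
-- def get_pairs_of_sum(num, n):
--     lo = max(1, num - n)
--     hi = (num - 1) // 2
--     res = [(num - i, i) for i in range(lo, hi + 1)]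
--     res1 = [x for p in res for x in p]
--     return (res, res1)
-- ===== Notes on version B (the rewrite author's own statement) =====
-- stated objective: alternative
-- what changed: Instead of scanning all i in 1..num//2 and filtering against the two conditions, B solves the inequalities in closed form and iterates only the valid contiguous range max(1,num-n)..(num-1)//2, building both result lists directly with no tests inside the loop.
import Mathlib
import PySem

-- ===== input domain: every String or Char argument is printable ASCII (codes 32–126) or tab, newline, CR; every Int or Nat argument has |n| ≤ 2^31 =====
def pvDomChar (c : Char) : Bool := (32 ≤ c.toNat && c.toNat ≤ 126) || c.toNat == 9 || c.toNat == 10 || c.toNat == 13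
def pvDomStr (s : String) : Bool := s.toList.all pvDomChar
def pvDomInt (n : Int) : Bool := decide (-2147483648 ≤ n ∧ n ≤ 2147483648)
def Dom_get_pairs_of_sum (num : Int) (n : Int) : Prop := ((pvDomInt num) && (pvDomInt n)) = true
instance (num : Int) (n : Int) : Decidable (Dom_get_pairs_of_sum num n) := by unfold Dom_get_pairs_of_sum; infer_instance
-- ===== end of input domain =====

-- B replaces A's scan-and-filter over 1..num//2 by iterating only the closed-form valid range
-- max(1, num-n) .. (num-1)//2 with no tests inside the loop (objective: alternative).

-- ===== PORT A =====
def get_pairs_of_sum (num : Int) (n : Int) : (List (Int × Int)) × List Int :=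
  (PySem.List.pyRange 1 (PySem.Int.floordiv num 2 + 1) 1).foldl
    (fun (s : List (Int × Int) × List Int) i =>
      let ln := num - i
      if ln > n then s
      else
        let rn := i
        if ln > rn then (s.1 ++ [(ln, rn)], s.2 ++ [ln, rn]) else s)
    ([], [])

-- ===== PORT B =====
def get_pairs_of_sum_alt (num : Int) (n : Int) : (List (Int × Int)) × List Int :=
  let lo := max 1 (num - n)
  let hi := PySem.Int.floordiv (num - 1) 2
  let res := (PySem.List.pyRange lo (hi + 1) 1).map (fun i => (num - i, i))
  let res1 := res.flatMap (fun p => [p.1, p.2])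
  (res, res1)

-- ===== PRECONDITION & SPEC =====
def Spec_get_pairs_of_sum (num : Int) (n : Int) (out : (List (Int × Int)) × List Int) : Prop := out = get_pairs_of_sum_alt num n
instance (num : Int) (n : Int) (out : (List (Int × Int)) × List Int) : Decidable (Spec_get_pairs_of_sum num n out) := by unfold Spec_get_pairs_of_sum; infer_instance

-- ===== CLAIM (what is proved, stated in full; the proofs are below) =====
def Claim_equal_get_pairs_of_sum : Prop := ∀ (num : Int) (n : Int), Dom_get_pairs_of_sum num n → Spec_get_pairs_of_sum num n (get_pairs_of_sum num n)

-- ===== LEMMAS AND PROOFS =====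

-- A's loop body appends exactly the filtered elements, to both accumulators.
theorem pairFold (num n : Int) (l : List Int) (acc : List (Int × Int)) (acc1 : List Int) :
    l.foldl
      (fun (s : List (Int × Int) × List Int) i =>
        let ln := num - i
        if ln > n then s
        else
          let rn := i
          if ln > rn then (s.1 ++ [(ln, rn)], s.2 ++ [ln, rn]) else s)
      (acc, acc1)
    = (acc ++ (l.filter (fun i => decide (num - n ≤ i ∧ i < PySem.Int.floordiv (num - 1) 2 + 1))).map
          (fun i => (num - i, i)),
       acc1 ++ (l.filter (fun i => decide (num - n ≤ i ∧ i < PySem.Int.floordiv (num - 1) 2 + 1))).flatMap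
          (fun i => [num - i, i])) := by
  induction l generalizing acc acc1 with
  | nil => simp
  | cons x xs ih =>
    have hdiv : PySem.Int.floordiv (num - 1) 2 = (num - 1) / 2 :=
      PySem.Int.floordiv_eq_ediv_of_pos (by omega)
    have hcond : (decide (num - n ≤ x ∧ x < PySem.Int.floordiv (num - 1) 2 + 1))
        = (¬ (num - x > n) ∧ num - x > x : Bool) := by
      rw [hdiv]
      by_cases h1 : num - n ≤ x ∧ x < (num - 1) / 2 + 1
      · simp only [decide_eq_true h1]
        have : ¬ (num - x > n) ∧ num - x > x := by constructor <;> omega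
        simp [this.1, this.2]
      · simp only [decide_eq_false h1]
        have : ¬ (¬ (num - x > n) ∧ num - x > x) := by
          intro ⟨ha, hb⟩; exact h1 ⟨by omega, by omega⟩
        by_cases ha : num - x > n <;> simp_all
    simp only [List.foldl_cons, List.filter_cons]
    by_cases ha : num - x > n
    · have : (decide (num - n ≤ x ∧ x < PySem.Int.floordiv (num - 1) 2 + 1)) = false := by
        rw [hcond]; simp [ha]
      simp only [this, if_pos ha, ih]
      simp
    · by_cases hb : num - x > x
      · have : (decide (num - n ≤ x ∧ x < PySem.Int.floordiv (num - 1) 2 + 1)) = true := by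
          rw [hcond]; simp [ha, hb]
        simp only [this, if_neg ha, if_pos hb, ih]
        simp
      · have : (decide (num - n ≤ x ∧ x < PySem.Int.floordiv (num - 1) 2 + 1)) = false := by
          rw [hcond]; simp [ha, hb]
        simp only [this, if_neg ha, if_neg hb, ih]
        simp

-- filtering an increasing unit range by a closed interval yields the clipped range
theorem filter_pyRange_interval (a b c d : Int) :
    (PySem.List.pyRange a b 1).filter (fun x => decide (c ≤ x ∧ x < d))
      = PySem.List.pyRange (max a c) (min b d) 1 := by
  by_cases hab : b ≤ a
  · rw [PySem.List.pyRange_one_eq_nil hab, PySem.List.pyRange_one_eq_nil (by omega)]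
    simp
  · replace hab : a < b := by omega
    have hlen : ((b - (a+1)).toNat) < ((b - a).toNat) := by omega
    rw [PySem.List.pyRange_one_cons hab, List.filter_cons,
        filter_pyRange_interval (a+1) b c d]
    by_cases hc : c ≤ a ∧ a < d
    · have h1 : max (a+1) c = a + 1 := by omega
      have h2 : max a c = a := by omega
      have hd : a < min b d := by omega
      rw [h1, h2, PySem.List.pyRange_one_cons hd]
      simp [hc]
    · by_cases hca : c ≤ a
      · have had : d ≤ a := by by_contra h; exact hc ⟨hca, by omega⟩
        rw [PySem.List.pyRange_one_eq_nil (show min b d ≤ max (a+1) c by omega),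
            PySem.List.pyRange_one_eq_nil (show min b d ≤ max a c by omega)]
        simp [hc]
      · have h3 : max (a+1) c = max a c := by omega
        rw [h3]
        simp [hc]
termination_by (b - a).toNat

-- ===== VERDICT (by name: the statement is the Claim_ definition above) =====
theorem get_pairs_of_sum_spec : Claim_equal_get_pairs_of_sum := by
  intro num n _
  unfold Spec_get_pairs_of_sum get_pairs_of_sum get_pairs_of_sum_alt
  rw [pairFold, filter_pyRange_interval]
  have hd1 : PySem.Int.floordiv num 2 = num / 2 := PySem.Int.floordiv_eq_ediv_of_pos (by omega)
  have hd2 : PySem.Int.floordiv (num - 1) 2 = (num - 1) / 2 := PySem.Int.floordiv_eq_ediv_of_pos (by omega)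
  have hclip : min (PySem.Int.floordiv num 2 + 1) (PySem.Int.floordiv (num - 1) 2 + 1)
      = PySem.Int.floordiv (num - 1) 2 + 1 := by rw [hd1, hd2]; omega
  rw [hclip]
  simp [List.flatMap_map]
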